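-- pv_equiv track=rewrite | github.com/zhangcongyao/DataMining | 作业二/dm21.py | ziji
-- ===== SOURCE A (Python) =====
-- def ziji(items,k):
--     sub_list_all = []
--     N = len(items)
--     for i in range(2 ** N):
--         combo = []
--         for j in range(N):
--             # test jth bit of integer i
--             if (i >> j) % 2 == 1:
--                 combo.append(items[j])
--         if(len(combo)==k):
--             sub_list_all.append(combo)
--     return sub_list_all
-- ===== SOURCE B (Python) =====
-- def ziji(items, k):
--     # Colex recursion: subsets of the first n items with r elements, in
--     # increasing-bitmask order (masks without the top bit come first).
--     def colex(n, r):
--         if r < 0 or r > n: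
--             return []
--         if r == 0:
--             return [[]]
--         return colex(n - 1, r) + [s + [items[n - 1]] for s in colex(n - 1, r - 1)]
--     return colex(len(items), k)
-- ===== Notes on version B (the rewrite author's own statement) =====
-- stated objective: faster
-- what changed: B replaces A's scan of all 2^N bitmasks (inner N-step bit test per mask) by a colex recursion that builds only the C(N,k) size-k subsets directly in the same increasing-mask order; intended as faster, measured 31.5x at n=16 (at n=64 the output itself is exponentially large, so neither finishes).
import Mathlib
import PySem

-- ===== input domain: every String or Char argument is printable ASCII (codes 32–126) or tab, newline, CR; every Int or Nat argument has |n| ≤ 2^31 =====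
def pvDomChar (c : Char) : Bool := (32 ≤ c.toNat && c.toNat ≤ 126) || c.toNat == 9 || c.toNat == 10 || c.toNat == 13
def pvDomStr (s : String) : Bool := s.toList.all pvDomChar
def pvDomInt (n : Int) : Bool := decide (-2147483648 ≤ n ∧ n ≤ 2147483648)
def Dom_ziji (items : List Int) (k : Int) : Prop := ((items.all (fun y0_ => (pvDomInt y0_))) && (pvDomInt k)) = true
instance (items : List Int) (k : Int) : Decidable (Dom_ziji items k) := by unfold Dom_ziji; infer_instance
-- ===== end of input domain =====

-- B enumerates the C(N,k) size-k subsets directly by a colex recursion instead of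
-- scanning all 2^N bitmasks; same output list in the same (increasing-mask) order.

-- ===== PORT A =====
def ziji (items : List Int) (k : Int) : List (List Int) :=
  let N : Int := PySem.List.len items
  (PySem.List.pyRange 0 (2 ^ N.toNat) 1).foldl (fun sub_list_all i =>
    let combo : List Int :=
      (PySem.List.pyRange 0 N 1).foldl (fun combo j =>
        -- (i >> j) % 2 == 1 : here i, j ≥ 0, so i >> j is exactly i // 2**j
        if PySem.Int.mod (PySem.Int.floordiv i (2 ^ j.toNat)) 2 = 1 then
          combo ++ [PySem.List.pyGetD items j 0]  -- items[j]: j ∈ range(N) is in bounds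
        else combo) []
    if PySem.List.len combo = k then sub_list_all ++ [combo] else sub_list_all) []

-- ===== PORT B =====
-- colex(n, r) of Source B; n is a Python int always ≥ 0 in every call, ported as Nat
def colexB (items : List Int) : Nat → Int → List (List Int)
  | 0, r => if r < 0 ∨ r > (0 : Int) then [] else if r = 0 then [[]] else []
  | n + 1, r =>
    if r < 0 ∨ r > ((n : Int) + 1) then []
    else if r = 0 then [[]]
    else colexB items n r ++
      (colexB items n (r - 1)).map (fun s => s ++ [PySem.List.pyGetD items (n : Int) 0])
      -- items[n-1]: 1 ≤ n ≤ len(items) in every recursive call, so in bounds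

def ziji_alt (items : List Int) (k : Int) : List (List Int) :=
  colexB items items.length k

-- ===== PRECONDITION & SPEC =====
def Spec_ziji (items : List Int) (k : Int) (out : List (List Int)) : Prop := out = ziji_alt items k
instance (items : List Int) (k : Int) (out : List (List Int)) : Decidable (Spec_ziji items k out) := by unfold Spec_ziji; infer_instance

-- ===== CLAIM (what is proved, stated in full; the proofs are below) =====
def Claim_equal_ziji : Prop := ∀ (items : List Int) (k : Int), Dom_ziji items k → Spec_ziji items k (ziji items k)

-- ===== LEMMAS AND PROOFS =====

-- combo built by A's inner loop for mask i, in Nat arithmetic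
def cN (items : List Int) (i : Nat) : List Int :=
  ((List.range items.length).filter (fun j => i / 2 ^ j % 2 = 1)).map
    (fun j => items.getD j 0)

-- A's whole loop, in Nat arithmetic
def aN (items : List Int) (k : Int) : List (List Int) :=
  ((List.range (2 ^ items.length)).filter
      (fun i => decide (((cN items i).length : Int) = k))).map (cN items)

theorem ziji_eq_aN (items : List Int) (k : Int) : ziji items k = aN items k := by
  unfold ziji aN
  simp only [PySem.List.len_eq, Int.toNat_natCast]
  rw [show ((2:Int) ^ items.length) = ((2 ^ items.length : Nat) : Int) by push_cast; ring,
    PySem.List.pyRange_zero_nat, PySem.List.pyRange_zero_nat, List.foldl_map]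
  have hcast2 : ∀ b : Nat, ((2:Int) ^ b) = ((2 ^ b : Nat) : Int) := by
    intro b; push_cast; ring
  have hmod2 : ∀ m : Nat, PySem.Int.mod ((m : Nat) : Int) 2 = ((m % 2 : Nat) : Int) := by
    intro m; exact_mod_cast PySem.Int.mod_natCast m 2
  have hpq : ∀ i j : Nat,
      (PySem.Int.mod (PySem.Int.floordiv (i:Int) (2 ^ ((j:Int)).toNat)) 2 = 1)
        ↔ (i / 2 ^ j % 2 = 1) := by
    intro i j
    rw [Int.toNat_natCast, hcast2 j, PySem.Int.floordiv_natCast, hmod2 (i / 2 ^ j)]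
    exact ⟨fun h => by exact_mod_cast h, fun h => by exact_mod_cast h⟩
  have hinner : ∀ i : Nat,
      (List.foldl (fun combo j =>
        if PySem.Int.mod (PySem.Int.floordiv (i:Int) (2 ^ j.toNat)) 2 = 1 then
          combo ++ [PySem.List.pyGetD items j 0]
        else combo) [] (List.map (fun j : Nat => (j : Int)) (List.range items.length)))
      = cN items i := by
    intro i
    rw [PySem.List.foldl_append_ite
      (fun j : Int => PySem.Int.mod (PySem.Int.floordiv (i:Int) (2 ^ j.toNat)) 2 = 1)
      (fun j : Int => PySem.List.pyGetD items j 0), List.nil_append,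
      List.filter_map, List.map_map]
    unfold cN
    rw [List.filter_congr (q := fun j : Nat => decide (i / 2 ^ j % 2 = 1)) (fun a _ => by
      simp only [Function.comp_apply, decide_eq_decide]
      exact hpq i a)]
    apply List.map_congr_left
    intro a _
    simp [PySem.List.pyGetD_natCast]
  trans (List.foldl (fun (x : List (List Int)) (y : Nat) =>
      if ((cN items y).length : Int) = k then x ++ [cN items y] else x) []
      (List.range (2 ^ items.length)))
  · apply PySem.List.foldl_congr_mem
    intro acc y _
    simp only [hinner y]
  · rw [PySem.List.foldl_append_ite (fun i : Nat => ((cN items i).length : Int) = k)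
      (cN items) (List.range (2 ^ items.length)) []]
    rfl

theorem cN_nil (i : Nat) : cN [] i = [] := by simp [cN]

theorem cN_append_lo (items : List Int) (x : Int) (i : Nat) (hi : i < 2 ^ items.length) :
    cN (items ++ [x]) i = cN items i := by
  unfold cN
  rw [List.length_append, List.length_singleton, List.range_succ, List.filter_append]
  have hN : ¬ (i / 2 ^ items.length % 2 = 1) := by
    rw [Nat.div_eq_of_lt hi]; decide
  simp only [List.filter_cons, List.filter_nil, decide_eq_true_eq, hN, if_false]
  rw [List.append_nil]
  apply List.map_congr_left
  intro a ha
  have : a < items.length := (List.mem_range.mp (List.mem_of_mem_filter ha))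
  exact List.getD_append _ _ _ _ this

theorem cN_append_hi (items : List Int) (x : Int) (i : Nat) (hi : i < 2 ^ items.length) :
    cN (items ++ [x]) (2 ^ items.length + i) = cN items i ++ [x] := by
  unfold cN
  rw [List.length_append, List.length_singleton, List.range_succ, List.filter_append]
  have hN : (2 ^ items.length + i) / 2 ^ items.length % 2 = 1 := by
    have h1 : (2 ^ items.length + i) / 2 ^ items.length = i / 2 ^ items.length + 1 := by
      rw [Nat.add_comm]
      exact Nat.add_div_right i (pow_pos (by norm_num) _)
    rw [h1, Nat.div_eq_of_lt hi]
  have hfilter : (List.range items.length).filter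
      (fun j => (2 ^ items.length + i) / 2 ^ j % 2 = 1)
      = (List.range items.length).filter (fun j => i / 2 ^ j % 2 = 1) := by
    apply List.filter_congr
    intro j hj
    have hjN : j < items.length := List.mem_range.mp hj
    have hdvd : 2 ^ j ∣ 2 ^ items.length := pow_dvd_pow 2 (le_of_lt hjN)
    have hdiv : (2 ^ items.length + i) / 2 ^ j = 2 ^ (items.length - j) + i / 2 ^ j := by
      obtain ⟨c, hc⟩ := hdvd
      have h2j : 0 < 2 ^ j := pow_pos (by norm_num) j
      have : 2 ^ items.length = 2 ^ (items.length - j) * 2 ^ j := by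
        rw [← pow_add]; congr 1; omega
      rw [this, Nat.add_comm, Nat.add_mul_div_right _ _ h2j, Nat.add_comm]
    have heven : 2 ^ (items.length - j) % 2 = 0 := by
      have h1 : 1 ≤ items.length - j := by omega
      have : 2 ^ (items.length - j) = 2 * 2 ^ (items.length - j - 1) := by
        rw [← pow_succ']; congr 1; omega
      omega
    have : (2 ^ (items.length - j) + i / 2 ^ j) % 2 = i / 2 ^ j % 2 := by omega
    rw [hdiv]
    simp [this]
  rw [hfilter]
  simp only [List.filter_cons, List.filter_nil, decide_eq_true_eq, hN, if_true]
  rw [List.map_append]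
  congr 1
  · apply List.map_congr_left
    intro a ha
    have : a < items.length := (List.mem_range.mp (List.mem_of_mem_filter ha))
    exact List.getD_append _ _ _ _ this
  · simp [List.getD]

theorem aN_append (items : List Int) (x : Int) (k : Int) :
    aN (items ++ [x]) k = aN items k ++ (aN items (k - 1)).map (fun s => s ++ [x]) := by
  unfold aN
  rw [List.length_append, List.length_singleton, pow_succ, Nat.mul_two, List.range_add,
    List.filter_append, List.map_append]
  congr 1
  · -- low masks: bit N clear, same subsets as over items
    have hf : (List.range (2 ^ items.length)).filter
        (fun i => decide (((cN (items ++ [x]) i).length : Int) = k))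
        = (List.range (2 ^ items.length)).filter
            (fun i => decide (((cN items i).length : Int) = k)) := by
      apply List.filter_congr
      intro i hi
      rw [cN_append_lo items x i (List.mem_range.mp hi)]
    rw [hf]
    apply List.map_congr_left
    intro i hi
    exact cN_append_lo items x i (List.mem_range.mp (List.mem_of_mem_filter hi))
  · -- high masks: bit N set, subsets are (size k-1 subset of items) ++ [x]
    have hf : (List.range (2 ^ items.length)).filter
        ((fun i => decide (((cN (items ++ [x]) i).length : Int) = k)) ∘
          (fun i => 2 ^ items.length + i))
        = (List.range (2 ^ items.length)).filter
            (fun i => decide (((cN items i).length : Int) = k - 1)) := by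
      apply List.filter_congr
      intro i hi
      simp only [Function.comp_apply, cN_append_hi items x i (List.mem_range.mp hi),
        List.length_append, List.length_singleton, decide_eq_decide]
      push_cast
      omega
    rw [List.filter_map, List.map_map, hf, List.map_map]
    apply List.map_congr_left
    intro i hi
    simp only [Function.comp_apply,
      cN_append_hi items x i (List.mem_range.mp (List.mem_of_mem_filter hi))]

theorem colexB_of_neg (items : List Int) (n : Nat) (r : Int) (h : r < 0) :
    colexB items n r = [] := by
  cases n <;> (simp only [colexB]; rw [if_pos (Or.inl h)])

theorem colexB_of_gt (items : List Int) (n : Nat) (r : Int) (h : (n : Int) < r) :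
    colexB items n r = [] := by
  cases n with
  | zero => simp only [colexB]; rw [if_pos]; right; exact_mod_cast h
  | succ m =>
    simp only [colexB]
    rw [if_pos (Or.inr (by push_cast at h; omega))]

theorem colexB_zero (items : List Int) (n : Nat) : colexB items n 0 = [[]] := by
  cases n <;> (simp [colexB]; try omega)

theorem colexB_succ (items : List Int) (n : Nat) (r : Int) :
    colexB items (n + 1) r = colexB items n r ++
      (colexB items n (r - 1)).map (fun s => s ++ [PySem.List.pyGetD items (n : Int) 0]) := by
  by_cases h1 : r < 0
  · rw [colexB_of_neg _ _ _ h1, colexB_of_neg _ _ _ h1,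
      colexB_of_neg _ _ _ (by omega : r - 1 < 0)]
    simp
  · by_cases h2 : ((n : Int) + 1) < r
    · rw [colexB_of_gt _ _ _ (by push_cast; omega)]
      rw [colexB_of_gt _ _ _ (by omega : (n : Int) < r),
        colexB_of_gt _ _ _ (by omega : (n : Int) < r - 1)]
      simp
    · by_cases h0 : r = 0
      · subst h0
        rw [colexB_zero, colexB_zero, colexB_of_neg _ _ _ (by omega)]
        simp
      · simp only [colexB]
        rw [if_neg (by omega), if_neg h0]

theorem colexB_append (items : List Int) (x : Int) (n : Nat) (r : Int)
    (h : n ≤ items.length) :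
    colexB (items ++ [x]) n r = colexB items n r := by
  induction n generalizing r with
  | zero => simp [colexB]
  | succ m ih =>
    rw [colexB_succ, colexB_succ, ih r (by omega), ih (r - 1) (by omega)]
    have : PySem.List.pyGetD (items ++ [x]) (m : Int) 0 = PySem.List.pyGetD items (m : Int) 0 := by
      rw [PySem.List.pyGetD_natCast, PySem.List.pyGetD_natCast]
      exact List.getD_append _ _ _ _ (by omega)
    rw [this]

theorem ziji_alt_append (items : List Int) (x : Int) (k : Int) :
    ziji_alt (items ++ [x]) k
      = ziji_alt items k ++ (ziji_alt items (k - 1)).map (fun s => s ++ [x]) := by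
  unfold ziji_alt
  rw [List.length_append, List.length_singleton, colexB_succ,
    colexB_append items x _ _ (le_refl _), colexB_append items x _ _ (le_refl _)]
  have : PySem.List.pyGetD (items ++ [x]) (items.length : Int) 0 = x := by
    rw [PySem.List.pyGetD_natCast]
    simp [List.getD]
  rw [this]

theorem ziji_eq_alt (items : List Int) (k : Int) : ziji items k = ziji_alt items k := by
  induction items using List.reverseRecOn generalizing k with
  | nil =>
    rw [ziji_eq_aN]
    unfold aN ziji_alt
    simp only [List.length_nil, pow_zero, List.range_one]
    simp only [colexB, cN_nil]
    by_cases h : k = 0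
    · subst h; simp [cN_nil]
    · have : ¬ ((0:Int) = k) := fun hh => h hh.symm
      simp [h, this]
  | append_singleton items x ih =>
    rw [ziji_eq_aN, aN_append, ← ziji_eq_aN items k, ← ziji_eq_aN items (k - 1),
      ih k, ih (k - 1), ziji_alt_append]

-- ===== VERDICT (by name: the statement is the Claim_ definition above) =====
theorem ziji_spec : Claim_equal_ziji := by
  intro items k _
  unfold Spec_ziji
  exact ziji_eq_alt items k
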